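-- pv_equiv track=rewrite | github.com/marvin4594/galaxies | scripts/functions.py | equalNbins
-- ===== SOURCE A (Python) =====
-- def equalNbins(N_points,N_bins):
--     n = int(N_points/N_bins)
--     rest = N_points-n*N_bins
--
--     N_ppb = []
--     for i in range(N_bins):
--         if (rest>0):
--             rest-=1
--             ex=1
--         else: ex=0
--         N_ppb.append(n+ex)
--
--     bins = []
--     start=0
--     for i in range(N_bins):
--         bins.append(range(start,start+N_ppb[i]))
--         start += N_ppb[i]
--
--     return bins
-- ===== SOURCE B (Python) =====
-- def equalNbins(N_points, N_bins):
--     n = int(N_points / N_bins)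
--     r = max(N_points - n * N_bins, 0)
--     return [range(i * n + min(i, r), (i + 1) * n + min(i + 1, r))
--             for i in range(N_bins)]
-- ===== Notes on version B (the rewrite author's own statement) =====
-- stated objective: simpler
-- what changed: Replaces the two sequential loops (building a per-bin counts list, then sweeping a running start accumulator) with a single comprehension that computes each bin's boundaries independently from the closed form i*n + min(i, r).
import Mathlib
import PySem

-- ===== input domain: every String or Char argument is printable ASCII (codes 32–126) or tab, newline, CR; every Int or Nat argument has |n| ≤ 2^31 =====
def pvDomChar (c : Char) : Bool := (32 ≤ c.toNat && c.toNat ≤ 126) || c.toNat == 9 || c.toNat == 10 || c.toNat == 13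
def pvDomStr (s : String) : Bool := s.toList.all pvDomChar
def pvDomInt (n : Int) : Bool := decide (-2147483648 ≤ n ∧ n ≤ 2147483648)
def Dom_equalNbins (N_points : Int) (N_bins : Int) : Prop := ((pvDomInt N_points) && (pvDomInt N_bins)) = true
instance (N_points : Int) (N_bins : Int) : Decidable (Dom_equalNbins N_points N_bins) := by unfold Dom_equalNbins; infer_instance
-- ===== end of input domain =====

-- B replaces A's counts list + running-start accumulator by one comprehension with
-- closed-form bin boundaries (objective: simpler). Equivalence of return values on N_bins ≠ 0.

-- ===== PORT A =====
-- int(N_points/N_bins) truncates toward zero; exact as Int.tdiv on |args| ≤ 2^31 (float quotient has enough precision there).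
def equalNbins (N_points : Int) (N_bins : Int) : List (List Int) :=
  let n := N_points.tdiv N_bins
  let rest := N_points - n * N_bins
  let s1 := (PySem.List.pyRange 0 N_bins 1).foldl
    (fun (st : List Int × Int) _ =>
      if st.2 > 0 then (st.1 ++ [n + 1], st.2 - 1) else (st.1 ++ [n], st.2))
    ([], rest)
  let N_ppb := s1.1
  let s2 := (PySem.List.pyRange 0 N_bins 1).foldl
    (fun (st : List (List Int) × Int) i =>
      let k := PySem.List.pyGetD N_ppb i 0   -- N_ppb[i]: always in range (len N_ppb = N_bins)
      (st.1 ++ [PySem.List.pyRange st.2 (st.2 + k) 1], st.2 + k))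
    ([], 0)
  s2.1

-- ===== PORT B =====
def equalNbins_alt (N_points : Int) (N_bins : Int) : List (List Int) :=
  let n := N_points.tdiv N_bins
  let r := max (N_points - n * N_bins) 0
  (PySem.List.pyRange 0 N_bins 1).map
    (fun i => PySem.List.pyRange (i * n + min i r) ((i + 1) * n + min (i + 1) r) 1)

-- ===== PRECONDITION & SPEC =====
-- A raises ZeroDivisionError iff N_bins == 0 (B raises there too).
def Pre_equalNbins (N_points : Int) (N_bins : Int) : Prop := N_bins ≠ 0
instance (N_points : Int) (N_bins : Int) : Decidable (Pre_equalNbins N_points N_bins) := by unfold Pre_equalNbins; infer_instance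
def pvWitness_equalNbins : Int × Int := (10, 3)

def Spec_equalNbins (N_points : Int) (N_bins : Int) (out : List (List Int)) : Prop := out = equalNbins_alt N_points N_bins
instance (N_points : Int) (N_bins : Int) (out : List (List Int)) : Decidable (Spec_equalNbins N_points N_bins out) := by unfold Spec_equalNbins; infer_instance

-- ===== CLAIM (what is proved, stated in full; the proofs are below) =====
def Claim_equal_equalNbins : Prop := ∀ (N_points : Int) (N_bins : Int), Dom_equalNbins N_points N_bins → Pre_equalNbins N_points N_bins → Spec_equalNbins N_points N_bins (equalNbins N_points N_bins)

-- ===== LEMMAS AND PROOFS =====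

-- A's first loop: element i of N_ppb is n+1 iff i < rest, and the leftover rest is max (rest-N) (min rest 0).
theorem pv_loop1 (n : Int) (N : Nat) : ∀ (rest : Int) (acc : List Int),
    (PySem.List.pyRange 0 (N : Int) 1).foldl
      (fun (st : List Int × Int) _ =>
        if st.2 > 0 then (st.1 ++ [n + 1], st.2 - 1) else (st.1 ++ [n], st.2))
      (acc, rest)
    = (acc ++ (PySem.List.pyRange 0 (N : Int) 1).map
        (fun i => n + if i < rest then 1 else 0),
       max (rest - N) (min rest 0)) := by
  induction N with
  | zero => intro rest acc; simp [PySem.List.pyRange_one_eq_nil]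
  | succ N ih =>
    intro rest acc
    have h1 : ((N : Int) + 1) = ((N + 1 : Nat) : Int) := by push_cast; ring
    rw [← h1, PySem.List.pyRange_one_succ_right (by positivity : (0:Int) ≤ (N:Int)),
        List.foldl_append, List.map_append, ih]
    simp only [List.foldl_cons, List.foldl_nil, List.map_cons, List.map_nil]
    split_ifs with h2 h3 h3 <;>
      simp only [Prod.mk.injEq, List.append_assoc, add_zero] <;>
      constructor <;> first
        | trivial
        | omega

theorem pv_loop2 (n rest : Int) (N : Nat) (N_ppb : List Int)
    (hget : ∀ i : Int, 0 ≤ i → i < (N : Int) →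
      PySem.List.pyGetD N_ppb i 0 = n + if i < rest then 1 else 0) :
    (PySem.List.pyRange 0 (N : Int) 1).foldl
      (fun (st : List (List Int) × Int) i =>
        let k := PySem.List.pyGetD N_ppb i 0
        (st.1 ++ [PySem.List.pyRange st.2 (st.2 + k) 1], st.2 + k))
      ([], 0)
    = ((PySem.List.pyRange 0 (N : Int) 1).map
        (fun i => PySem.List.pyRange (i * n + min i (max rest 0))
                    ((i + 1) * n + min (i + 1) (max rest 0)) 1),
       (N : Int) * n + min (N : Int) (max rest 0)) := by
  induction N with
  | zero => simp [PySem.List.pyRange_one_eq_nil]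
  | succ N ih =>
    have h1 : ((N : Int) + 1) = ((N + 1 : Nat) : Int) := by push_cast; ring
    rw [← h1, PySem.List.pyRange_one_succ_right (by positivity : (0:Int) ≤ (N:Int)),
        List.foldl_append, List.map_append,
        ih (fun i h0 hN => hget i h0 (by omega))]
    simp only [List.foldl_cons, List.foldl_nil, List.map_cons, List.map_nil]
    rw [hget (N : Int) (by positivity) (by omega)]
    have hm : min ((N : Int) + 1) (max rest 0)
        = min (N : Int) (max rest 0) + (if (N : Int) < rest then 1 else 0) := by
      have h0 : (0:Int) ≤ (N:Int) := by positivity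
      split_ifs with h <;> omega
    have e1 : (N : Int) * n + min (N : Int) (max rest 0)
        + (n + if (N : Int) < rest then 1 else 0)
        = ((N : Int) + 1) * n + min ((N : Int) + 1) (max rest 0) := by
      rw [hm]; ring
    rw [e1]

theorem equalNbins_eq (N_points N_bins : Int) (h : N_bins ≠ 0) :
    equalNbins N_points N_bins = equalNbins_alt N_points N_bins := by
  unfold equalNbins equalNbins_alt
  rcases le_or_gt N_bins 0 with hle | hpos
  · simp [PySem.List.pyRange_one_eq_nil (by omega : N_bins ≤ 0)]
  · obtain ⟨N, rfl⟩ : ∃ N : Nat, N_bins = (N : Int) :=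
      ⟨N_bins.toNat, (Int.toNat_of_nonneg (by omega)).symm⟩
    set n := N_points.tdiv (N : Int) with hn
    set rest := N_points - n * (N : Int) with hrest
    simp only []
    rw [pv_loop1 n N rest []]
    simp only [List.nil_append]
    have hg : ∀ i : Int, 0 ≤ i → i < (N : Int) →
        PySem.List.pyGetD ((PySem.List.pyRange 0 (N : Int) 1).map
          (fun i => n + if i < rest then 1 else 0)) i 0
        = n + if i < rest then 1 else 0 := fun i h0 hN =>
      PySem.List.pyGetD_map_pyRange_of_nonneg _ _ _ _ h0 hN
    rw [pv_loop2 n rest N _ hg]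

-- ===== VERDICT (by name: the statement is the Claim_ definition above) =====
theorem equalNbins_spec : Claim_equal_equalNbins := by
  intro N_points N_bins _ hpre
  unfold Spec_equalNbins
  exact equalNbins_eq N_points N_bins hpre
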